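-- pv_equiv track=rewrite | github.com/PeerChristensen/invoiceParsing | old/get_FSC_codes.py | get_fsc_code
-- ===== SOURCE A (Python) =====
-- def get_fsc_code(content) -> str:
--     """Get FSC code from edi file"""
--
--     fsc_code = None
--     for string in content:
--         if "COC" in string.upper():
--             coc_string = string.upper().split(" ")
--             for substring in coc_string:
--                 if "COC" in substring:
--                     fsc_code = substring
--                     break
--
--     if fsc_code:
--         return fsc_code
--     else:
--         return ""
-- ===== SOURCE B (Python) =====
-- def get_fsc_code(content) -> str:
--     """Get FSC code from edi file"""
--     for line in reversed(list(content)):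
--         u = line.upper()
--         if "COC" in u:
--             for tok in u.split(" "):
--                 if "COC" in tok:
--                     return tok
--     return ""
-- ===== Notes on version B (the rewrite author's own statement) =====
-- stated objective: alternative
-- what changed: B iterates the materialized lines in reverse and returns at the first COC-containing token it finds, instead of A's full forward scan that keeps overwriting an accumulator.
import Mathlib
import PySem

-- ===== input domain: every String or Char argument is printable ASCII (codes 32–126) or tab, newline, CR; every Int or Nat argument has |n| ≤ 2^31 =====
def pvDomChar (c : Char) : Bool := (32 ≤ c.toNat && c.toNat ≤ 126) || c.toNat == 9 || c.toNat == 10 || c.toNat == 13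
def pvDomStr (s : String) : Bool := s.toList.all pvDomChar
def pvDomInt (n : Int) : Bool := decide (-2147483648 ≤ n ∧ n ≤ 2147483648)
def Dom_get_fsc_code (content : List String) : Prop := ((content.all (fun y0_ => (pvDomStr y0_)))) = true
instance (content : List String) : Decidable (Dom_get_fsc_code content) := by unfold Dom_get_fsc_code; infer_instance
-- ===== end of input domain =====

-- B iterates the materialized lines in reverse and returns at the first COC-containing token, instead of A's full forward scan with an accumulator. Return value only; neither mutates its argument.

-- ===== PORT A =====
-- u.split(" "): sep is the nonempty literal " ", so Python never raises; getD [] is unreachable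
def pvTokens (u : String) : List String := (PySem.Str.split? u " ").getD []

-- A's inner 'for substring … break' loop: first token containing "COC" wins, else accumulator unchanged
def pvInnerA : List String → Option String → Option String
  | [], acc => acc
  | t :: ts, acc => if PySem.Str.isIn "COC" t then some t else pvInnerA ts acc

def get_fsc_code (content : List String) : String :=
  let fsc :=
    content.foldl (fun acc s =>
      if PySem.Str.isIn "COC" (PySem.Str.upper s) then
        pvInnerA (pvTokens (PySem.Str.upper s)) acc
      else acc) none
  -- 'if fsc_code:' — Python truthiness: non-None and non-empty string
  match fsc with
  | some s => if s = "" then "" else s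
  | none => ""

-- ===== PORT B =====
-- B's inner 'for tok … return tok' loop: first token containing "COC", none if no token matches
def pvFindTok : List String → Option String
  | [] => none
  | t :: ts => if PySem.Str.isIn "COC" t then some t else pvFindTok ts

def pvScanRev : List String → String
  | [] => ""
  | l :: ls =>
    let u := PySem.Str.upper l
    if PySem.Str.isIn "COC" u then
      match pvFindTok (pvTokens u) with
      | some t => t
      | none => pvScanRev ls
    else pvScanRev ls

def get_fsc_code_alt (content : List String) : String := pvScanRev content.reverse

-- ===== PRECONDITION & SPEC =====
def Spec_get_fsc_code (content : List String) (out : String) : Prop := out = get_fsc_code_alt content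
instance (content : List String) (out : String) : Decidable (Spec_get_fsc_code content out) := by unfold Spec_get_fsc_code; infer_instance

-- ===== CLAIM (what is proved, stated in full; the proofs are below) =====
def Claim_equal_get_fsc_code : Prop := ∀ (content : List String), Dom_get_fsc_code content → Spec_get_fsc_code content (get_fsc_code content)

-- ===== LEMMAS AND PROOFS =====

-- the per-line "gain": if the line matches, the first COC-containing token (if any)
def pvLine (s : String) : Option String :=
  if PySem.Str.isIn "COC" (PySem.Str.upper s) then
    pvFindTok (pvTokens (PySem.Str.upper s))
  else none

theorem pvInnerA_eq (ts : List String) (acc : Option String) :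
    pvInnerA ts acc = (pvFindTok ts).or acc := by
  induction ts with
  | nil => rfl
  | cons t ts ih =>
    show (if PySem.Str.isIn "COC" t = true then some t else pvInnerA ts acc)
        = (if PySem.Str.isIn "COC" t = true then some t else pvFindTok ts).or acc
    by_cases h : PySem.Str.isIn "COC" t = true
    · rw [if_pos h, if_pos h]; rfl
    · rw [if_neg h, if_neg h, ih]

theorem pvStep_eq (l : String) (acc : Option String) :
    (if PySem.Str.isIn "COC" (PySem.Str.upper l) = true then
        pvInnerA (pvTokens (PySem.Str.upper l)) acc
      else acc) = (pvLine l).or acc := by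
  unfold pvLine
  by_cases h : PySem.Str.isIn "COC" (PySem.Str.upper l) = true
  · rw [if_pos h, if_pos h, pvInnerA_eq]
  · rw [if_neg h, if_neg h]; rfl

theorem pvFoldA_eq (ls : List String) (acc : Option String) :
    ls.foldl (fun acc s =>
      if PySem.Str.isIn "COC" (PySem.Str.upper s) then
        pvInnerA (pvTokens (PySem.Str.upper s)) acc
      else acc) acc
    = ((ls.reverse.findSome? pvLine).or acc) := by
  induction ls generalizing acc with
  | nil => rfl
  | cons l ls ih =>
    rw [List.foldl_cons, ih, List.reverse_cons, List.findSome?_append]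
    show (ls.reverse.findSome? pvLine).or
        (if PySem.Str.isIn "COC" (PySem.Str.upper l) = true then
            pvInnerA (pvTokens (PySem.Str.upper l)) acc
          else acc) = _
    rw [pvStep_eq]
    cases ls.reverse.findSome? pvLine with
    | some v => rfl
    | none => cases h : pvLine l <;> simp [List.findSome?, h]

theorem pvScanRev_eq (ls : List String) :
    pvScanRev ls = (ls.findSome? pvLine).getD "" := by
  induction ls with
  | nil => rfl
  | cons l ls ih =>
    show (if PySem.Str.isIn "COC" (PySem.Str.upper l) = true then
            match pvFindTok (pvTokens (PySem.Str.upper l)) with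
            | some t => t
            | none => pvScanRev ls
          else pvScanRev ls)
        = ((l :: ls).findSome? pvLine).getD ""
    rw [List.findSome?_cons]
    unfold pvLine
    by_cases h : PySem.Str.isIn "COC" (PySem.Str.upper l) = true
    · rw [if_pos h, if_pos h]
      cases pvFindTok (pvTokens (PySem.Str.upper l)) with
      | some t => rfl
      | none => exact ih
    · rw [if_neg h, if_neg h]; exact ih

-- ===== VERDICT (by name: the statement is the Claim_ definition above) =====
theorem get_fsc_code_spec : Claim_equal_get_fsc_code := by
  intro content _
  show get_fsc_code content = get_fsc_code_alt content
  unfold get_fsc_code get_fsc_code_alt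
  rw [pvFoldA_eq, pvScanRev_eq]
  cases hfs : content.reverse.findSome? pvLine with
  | none => rfl
  | some v => by_cases hv : v = "" <;> simp [hv]
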